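-- pv_equiv track=rewrite | github.com/maxprogrammer007/SmartDox | services.py | final_verdict
-- ===== SOURCE A (Python) =====
-- def final_verdict(results):
--     """
--     Determine final eligibility verdict
--     Returns: "Eligible" | "Not Eligible" | "Needs Manual Review"
--     """
--     # Count failures
--     failures = [v for v in results.values() if v == "FAIL"]
--     reviews = [v for v in results.values() if v == "REVIEW"]
--
--     if failures:
--         return "Not Eligible"
--     elif reviews:
--         return "Needs Manual Review"
--     else:
--         return "Eligible"
-- ===== SOURCE B (Python) =====
-- def final_verdict(results):
--     """
--     Determine final eligibility verdict
--     Returns: "Eligible" | "Not Eligible" | "Needs Manual Review"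
--     """
--     sev = max((2 if v == "FAIL" else 1 if v == "REVIEW" else 0
--                for v in results.values()), default=0)
--     return {2: "Not Eligible", 1: "Needs Manual Review"}.get(sev, "Eligible")
-- ===== Notes on version B (the rewrite author's own statement) =====
-- stated objective: alternative
-- what changed: Replaces the two filtered lists and the branch on their truthiness by a single pass computing the maximum severity (FAIL=2, REVIEW=1, else 0) and a lookup translating that number to the verdict.
import Mathlib
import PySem

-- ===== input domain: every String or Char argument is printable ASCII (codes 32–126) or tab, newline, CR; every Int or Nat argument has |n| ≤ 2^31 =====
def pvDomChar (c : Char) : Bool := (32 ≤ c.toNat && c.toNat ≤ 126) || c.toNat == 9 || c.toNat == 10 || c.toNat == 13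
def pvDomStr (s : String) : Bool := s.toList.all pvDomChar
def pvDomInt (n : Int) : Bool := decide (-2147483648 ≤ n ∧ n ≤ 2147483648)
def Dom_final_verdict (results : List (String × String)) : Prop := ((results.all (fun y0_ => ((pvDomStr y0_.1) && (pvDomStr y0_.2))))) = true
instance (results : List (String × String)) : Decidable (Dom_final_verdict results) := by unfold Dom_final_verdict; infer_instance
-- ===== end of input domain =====

-- ===== PORT A =====
-- B replaces A's two filtered lists with a single max-severity pass (alternative decomposition, same cost).
def final_verdict (results : List (String × String)) : String :=
  let failures := ((PySem.Dict.ofList results).values).filter (fun v => v == "FAIL")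
  let reviews := ((PySem.Dict.ofList results).values).filter (fun v => v == "REVIEW")
  if !failures.isEmpty then "Not Eligible"
  else if !reviews.isEmpty then "Needs Manual Review"
  else "Eligible"

-- ===== PORT B =====
def sevOf (v : String) : Int := if v == "FAIL" then 2 else if v == "REVIEW" then 1 else 0

def final_verdict_alt (results : List (String × String)) : String :=
  let sev := ((PySem.Dict.ofList results).values).foldl (fun acc v => max acc (sevOf v)) 0
  (PySem.Dict.ofList [((2 : Int), "Not Eligible"), (1, "Needs Manual Review")]).getD sev "Eligible"

-- ===== PRECONDITION & SPEC =====
def Spec_final_verdict (results : List (String × String)) (out : String) : Prop := out = final_verdict_alt results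
instance (results : List (String × String)) (out : String) : Decidable (Spec_final_verdict results out) := by unfold Spec_final_verdict; infer_instance

-- ===== CLAIM (what is proved, stated in full; the proofs are below) =====
def Claim_equal_final_verdict : Prop := ∀ (results : List (String × String)), Dom_final_verdict results → Spec_final_verdict results (final_verdict results)

-- ===== LEMMAS AND PROOFS =====
theorem foldl_sev (vs : List String) (a : Int) (ha : 0 ≤ a) :
    vs.foldl (fun acc v => max acc (sevOf v)) a
      = max a (if "FAIL" ∈ vs then 2 else if "REVIEW" ∈ vs then 1 else 0) := by
  induction vs generalizing a with
  | nil => simp; omega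
  | cons v vs ih =>
    simp only [List.foldl_cons, List.mem_cons]
    rw [ih _ (le_trans ha (le_max_left _ _))]
    by_cases hf : v = "FAIL" <;> by_cases hr : v = "REVIEW" <;>
      by_cases hF : "FAIL" ∈ vs <;> by_cases hR : "REVIEW" ∈ vs <;>
        simp [sevOf, hf, hr, hF, hR, max_def] <;> split_ifs <;> intros <;> first | omega | simp_all

theorem filter_beq_isEmpty (vs : List String) (s : String) :
    (vs.filter (fun v => v == s)).isEmpty = true ↔ s ∉ vs := by
  simp only [List.isEmpty_iff, List.filter_eq_nil_iff, beq_iff_eq]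
  constructor
  · intro h hs; exact (h s hs) rfl
  · intro h v hv he; exact h (he ▸ hv)

-- ===== VERDICT (by name: the statement is the Claim_ definition above) =====
theorem final_verdict_spec : Claim_equal_final_verdict := by
  intro results _
  unfold Spec_final_verdict final_verdict final_verdict_alt
  rw [foldl_sev _ _ le_rfl]
  generalize (PySem.Dict.ofList results).values = vs
  by_cases hf : "FAIL" ∈ vs <;> by_cases hr : "REVIEW" ∈ vs <;>
    simp [hf, hr, filter_beq_isEmpty] <;> decide
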